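-- pv_equiv track=rewrite | github.com/ArthurVanRemoortel/EDSiteProject | EDSite/helpers.py | chunks_no_overlap
-- ===== SOURCE A (Python) =====
-- def chunks_no_overlap(lst, n):
--     result = [[]]
--     i = 0
--     prev = None
--     for value in lst:
--         if i >= n and value != prev:
--             result.append([])
--             i = 0
--         result[-1].append(value)
--         i += 1
--         prev = value
--     return result
-- ===== SOURCE B (Python) =====
-- def chunks_no_overlap(lst, n):
--     # Phase 1: compress lst into maximal runs of equal values.
--     runs = []
--     for v in lst:
--         if runs and runs[-1][0] == v:
--             runs[-1] = (v, runs[-1][1] + 1)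
--         else:
--             runs.append((v, 1))
--     # Phase 2: pack whole runs into chunks of at least n elements.
--     result = [[]]
--     i = 0
--     for v, c in runs:
--         if i >= n:
--             result.append([])
--             i = 0
--         result[-1].extend([v] * c)
--         i += c
--     return result
-- ===== Notes on version B (the rewrite author's own statement) =====
-- stated objective: alternative
-- what changed: B first compresses the list into (value, count) runs, then packs whole runs into chunks in a second pass, instead of A's single element-wise loop tracking prev and deciding a break at every element.
import Mathlib
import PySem

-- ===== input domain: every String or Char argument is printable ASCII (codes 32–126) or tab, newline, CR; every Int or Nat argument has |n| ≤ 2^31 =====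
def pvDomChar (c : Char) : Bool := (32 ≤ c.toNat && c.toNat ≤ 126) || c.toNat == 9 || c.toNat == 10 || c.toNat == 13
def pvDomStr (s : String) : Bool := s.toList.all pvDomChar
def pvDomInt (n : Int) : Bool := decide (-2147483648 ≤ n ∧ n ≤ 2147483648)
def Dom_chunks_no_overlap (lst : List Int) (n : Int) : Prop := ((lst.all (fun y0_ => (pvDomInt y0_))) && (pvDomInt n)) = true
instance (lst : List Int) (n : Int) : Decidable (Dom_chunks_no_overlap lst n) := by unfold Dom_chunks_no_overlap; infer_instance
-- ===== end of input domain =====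

-- B builds (value, count) runs first and then packs whole runs into chunks (alternative
-- decomposition, same cost); A loops element-wise.  Both are total; equivalence is exact.

-- ===== PORT A =====
-- result[-1].append(v)  (result is always nonempty in A)
def pvAppendLast (r : List (List Int)) (v : Int) : List (List Int) :=
  match r with
  | [] => []
  | [c] => [c ++ [v]]
  | c :: rest => c :: pvAppendLast rest v

-- one iteration of A's for-loop; state = (result, i, prev)
def stepA (n : Int) (st : List (List Int) × Int × Option Int) (value : Int) :
    List (List Int) × Int × Option Int :=
  let result := st.1
  let i := st.2.1
  let prev := st.2.2
  let (result, i) :=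
    if i ≥ n ∧ some value ≠ prev then (result ++ [[]], (0 : Int)) else (result, i)
  (pvAppendLast result value, i + 1, some value)

def chunks_no_overlap (lst : List Int) (n : Int) : List (List Int) :=
  (lst.foldl (stepA n) ([[]], 0, none)).1

-- ===== PORT B =====
-- result[-1].extend(xs)
def pvExtendLast (r : List (List Int)) (xs : List Int) : List (List Int) :=
  match r with
  | [] => []
  | [c] => [c ++ xs]
  | c :: rest => c :: pvExtendLast rest xs

-- runs[-1] = (v, runs[-1][1] + 1)
def pvIncLast (runs : List (Int × Int)) : List (Int × Int) :=
  match runs with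
  | [] => []
  | [(v, c)] => [(v, c + 1)]
  | r :: rest => r :: pvIncLast rest

-- one iteration of B's first loop: "if runs and runs[-1][0] == v: bump last count else append (v,1)"
def stepRuns (runs : List (Int × Int)) (v : Int) : List (Int × Int) :=
  match runs.getLast? with
  | some (w, _) => if w = v then pvIncLast runs else runs ++ [(v, 1)]
  | none => runs ++ [(v, 1)]

-- one iteration of B's second loop; state = (result, i); [v]*c = replicate c.toNat v
def stepPack (n : Int) (st : List (List Int) × Int) (r : Int × Int) :
    List (List Int) × Int :=
  let v := r.1
  let c := r.2
  let result := st.1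
  let i := st.2
  let (result, i) := if i ≥ n then (result ++ [[]], (0 : Int)) else (result, i)
  (pvExtendLast result (List.replicate c.toNat v), i + c)

def chunks_no_overlap_alt (lst : List Int) (n : Int) : List (List Int) :=
  ((lst.foldl stepRuns []).foldl (stepPack n) ([[]], 0)).1

-- ===== PRECONDITION & SPEC =====
def Spec_chunks_no_overlap (lst : List Int) (n : Int) (out : List (List Int)) : Prop := out = chunks_no_overlap_alt lst n
instance (lst : List Int) (n : Int) (out : List (List Int)) : Decidable (Spec_chunks_no_overlap lst n out) := by unfold Spec_chunks_no_overlap; infer_instance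

-- ===== CLAIM (what is proved, stated in full; the proofs are below) =====
def Claim_equal_chunks_no_overlap : Prop := ∀ (lst : List Int) (n : Int), Dom_chunks_no_overlap lst n → Spec_chunks_no_overlap lst n (chunks_no_overlap lst n)

-- ===== LEMMAS AND PROOFS =====

-- the list of elements a run list denotes
def flattenRuns (R : List (Int × Int)) : List Int :=
  R.flatMap (fun p => List.replicate p.2.toNat p.1)

-- well-formed run lists: positive counts, adjacent values distinct
def WFRuns (R : List (Int × Int)) : Prop :=
  (∀ p ∈ R, 1 ≤ p.2) ∧ R.IsChain (fun a b => a.1 ≠ b.1)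

-- prev differs from the first run's value
def HeadCompat (prev : Option Int) (R : List (Int × Int)) : Prop :=
  ∀ p ∈ R.head?, some p.1 ≠ prev

lemma extendLast_ne_nil (r : List (List Int)) (xs : List Int) (h : r ≠ []) :
    pvExtendLast r xs ≠ [] := by
  cases r with
  | nil => exact absurd rfl h
  | cons c rest => cases rest <;> simp [pvExtendLast]

lemma extendLast_cons (c : List Int) (rest : List (List Int)) (xs : List Int) (h : rest ≠ []) :
    pvExtendLast (c :: rest) xs = c :: pvExtendLast rest xs := by
  cases rest with
  | nil => exact absurd rfl h
  | cons d t => rfl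

lemma extendLast_nil (r : List (List Int)) : pvExtendLast r [] = r := by
  induction r with
  | nil => rfl
  | cons c rest ih =>
    cases rest with
    | nil => simp [pvExtendLast]
    | cons d t => rw [extendLast_cons _ _ _ (by simp), ih]

lemma extendLast_extendLast (r : List (List Int)) (xs ys : List Int) :
    pvExtendLast (pvExtendLast r xs) ys = pvExtendLast r (xs ++ ys) := by
  induction r with
  | nil => rfl
  | cons c rest ih =>
    cases rest with
    | nil => simp [pvExtendLast]
    | cons d t =>
      rw [extendLast_cons _ _ xs (by simp), extendLast_cons _ _ (xs ++ ys) (by simp),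
        extendLast_cons _ _ ys (extendLast_ne_nil _ _ (by simp)), ih]

lemma appendLast_eq_extendLast (r : List (List Int)) (v : Int) :
    pvAppendLast r v = pvExtendLast r [v] := by
  induction r with
  | nil => rfl
  | cons c rest ih =>
    cases rest with
    | nil => rfl
    | cons d t =>
      rw [extendLast_cons _ _ _ (by simp), ← ih]
      rfl

-- A's loop over the tail of a run: prev = value, so it only appends
lemma tailrun (n v : Int) : ∀ (k : Nat) (res : List (List Int)) (i : Int),
    List.foldl (stepA n) (res, i, some v) (List.replicate k v)
      = (pvExtendLast res (List.replicate k v), i + k, some v) := by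
  intro k
  induction k with
  | zero => intro res i; simp [extendLast_nil]
  | succ k ih =>
    intro res i
    rw [List.replicate_succ]
    have hstep : stepA n (res, i, some v) v = (pvAppendLast res v, i + 1, some v) := by
      simp [stepA]
    rw [List.foldl_cons, hstep, ih]
    rw [appendLast_eq_extendLast, extendLast_extendLast]
    have h1 : ([v] ++ List.replicate k v) = List.replicate (k + 1) v := by
      simp [List.replicate_succ]
    have h3 : i + 1 + (k : Int) = i + ((k + 1 : Nat) : Int) := by push_cast; ring
    rw [h1, List.replicate_succ, h3]

-- core correspondence: A's element loop over the flattened runs = B's packing loop over the runs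
lemma run_equiv (n : Int) : ∀ (R : List (Int × Int)), WFRuns R →
    ∀ (res : List (List Int)) (i : Int) (prev : Option Int),
    res ≠ [] → HeadCompat prev R →
    (List.foldl (stepA n) (res, i, prev) (flattenRuns R)).1
      = (List.foldl (stepPack n) (res, i) R).1 := by
  intro R
  induction R with
  | nil => intro _ res i prev _ _; simp [flattenRuns]
  | cons r R' ih =>
    rintro ⟨hcnt, hchain⟩ res i prev hres hhead
    obtain ⟨v, c⟩ := r
    have hc : 1 ≤ c := hcnt (v, c) (by simp)
    obtain ⟨k, hk⟩ : ∃ k, c.toNat = k + 1 := ⟨c.toNat - 1, by omega⟩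
    have hflat : flattenRuns ((v, c) :: R') = List.replicate c.toNat v ++ flattenRuns R' := by
      simp [flattenRuns]
    have hprev : some v ≠ prev := hhead (v, c) (by simp)
    set res₀ : List (List Int) := if i ≥ n then res ++ [[]] else res with hres₀
    set i₀ : Int := if i ≥ n then (0 : Int) else i with hi₀
    have hstep1 : stepA n (res, i, prev) v = (pvAppendLast res₀ v, i₀ + 1, some v) := by
      by_cases hin : i ≥ n <;> simp [stepA, hin, hprev, hres₀, hi₀]
    have hres₀ne : res₀ ≠ [] := by
      by_cases hin : i ≥ n <;> simp [hres₀, hin, hres]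
    have hArun : List.foldl (stepA n) (res, i, prev) (List.replicate c.toNat v)
        = (pvExtendLast res₀ (List.replicate c.toNat v), i₀ + c, some v) := by
      rw [hk, List.replicate_succ, List.foldl_cons, hstep1, tailrun]
      rw [appendLast_eq_extendLast, extendLast_extendLast]
      have h1 : ([v] ++ List.replicate k v) = List.replicate (k + 1) v := by
        simp [List.replicate_succ]
      have h2 : i₀ + 1 + (k : Int) = i₀ + c := by
        have : ((c.toNat : Int)) = c := Int.toNat_of_nonneg (by omega)
        omega
      rw [h1, h2, List.replicate_succ]
    have hpack : stepPack n (res, i) (v, c)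
        = (pvExtendLast res₀ (List.replicate c.toNat v), i₀ + c) := by
      by_cases hin : i ≥ n <;> simp [stepPack, hin, hres₀, hi₀]
    have hWF' : WFRuns R' := by
      exact ⟨fun p hp => hcnt p (by simp [hp]), ((List.isChain_cons.mp hchain).2)⟩
    have hhead' : HeadCompat (some v) R' := by
      intro p hp
      have := (List.isChain_cons.mp hchain).1 p hp
      simpa [eq_comm] using this.symm
    rw [hflat, List.foldl_append, hArun, List.foldl_cons, hpack]
    exact ih hWF' _ _ _ (extendLast_ne_nil _ _ hres₀ne) hhead'

lemma incLast_concat (xs : List (Int × Int)) (w : Int) (c : Int) :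
    pvIncLast (xs ++ [(w, c)]) = xs ++ [(w, c + 1)] := by
  induction xs with
  | nil => rfl
  | cons x t ih =>
    cases t with
    | nil => simp [pvIncLast]
    | cons y u => simpa [pvIncLast] using ih

lemma flattenRuns_append (R S : List (Int × Int)) :
    flattenRuns (R ++ S) = flattenRuns R ++ flattenRuns S := by
  simp [flattenRuns]

-- each first-loop iteration keeps runs well-formed and appends exactly one element
lemma stepRuns_props (acc : List (Int × Int)) (v : Int) (h : WFRuns acc) :
    WFRuns (stepRuns acc v) ∧ flattenRuns (stepRuns acc v) = flattenRuns acc ++ [v] := by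
  obtain ⟨hcnt, hchain⟩ := h
  rcases acc.eq_nil_or_concat with rfl | ⟨xs, ⟨w, c⟩, hacc⟩
  · have hstep : stepRuns [] v = [(v, 1)] := rfl
    refine ⟨⟨?_, ?_⟩, ?_⟩
    · rw [hstep]; intro p hp; simp at hp; subst hp; norm_num
    · rw [hstep]; exact List.isChain_singleton _
    · rw [hstep]; simp [flattenRuns]
  · rw [List.concat_eq_append] at hacc
    subst hacc
    have hlast : (xs ++ [(w, c)]).getLast? = some (w, c) := by
      simp
    have hc : 1 ≤ c := hcnt (w, c) (by simp)
    by_cases hwv : w = v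
    · have hstep : stepRuns (xs ++ [(w, c)]) v = xs ++ [(w, c + 1)] := by
        simp [stepRuns, hwv, incLast_concat]
      refine ⟨⟨?_, ?_⟩, ?_⟩
      · intro p hp
        rw [hstep] at hp
        rcases (List.mem_append.mp hp) with hx | hx
        · exact hcnt p (by simp [hx])
        · simp at hx; subst hx; omega
      · rw [hstep]
        rw [List.isChain_append] at hchain ⊢
        refine ⟨hchain.1, List.isChain_singleton _, ?_⟩
        intro x hx y hy
        simp at hy; subst hy
        exact hchain.2.2 x hx (w, c) (by simp)
      · rw [hstep, flattenRuns_append, flattenRuns_append]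
        have h1 : (c + 1).toNat = c.toNat + 1 := by omega
        simp only [flattenRuns, List.flatMap_cons, List.flatMap_nil, List.append_nil]
        rw [h1, List.replicate_succ', hwv]
        simp
    · have hstep : stepRuns (xs ++ [(w, c)]) v = (xs ++ [(w, c)]) ++ [(v, 1)] := by
        simp [stepRuns, hlast, hwv]
      refine ⟨⟨?_, ?_⟩, ?_⟩
      · intro p hp
        rw [hstep] at hp
        rcases (List.mem_append.mp hp) with hx | hx
        · exact hcnt p hx
        · simp at hx; subst hx; omega
      · rw [hstep, List.isChain_append]
        refine ⟨hchain, List.isChain_singleton _, ?_⟩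
        intro x hx y hy
        simp at hy; subst hy
        rw [hlast] at hx
        simp at hx; subst hx
        simpa using hwv
      · rw [hstep, flattenRuns_append]
        simp [flattenRuns]

-- B's first loop produces a well-formed run list flattening back to its input
lemma runs_invariant : ∀ (lst : List Int) (acc : List (Int × Int)), WFRuns acc →
    WFRuns (List.foldl stepRuns acc lst)
      ∧ flattenRuns (List.foldl stepRuns acc lst) = flattenRuns acc ++ lst := by
  intro lst
  induction lst with
  | nil => intro acc h; exact ⟨h, by simp⟩
  | cons v rest ih =>
    intro acc h
    obtain ⟨h1, h2⟩ := stepRuns_props acc v h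
    obtain ⟨h3, h4⟩ := ih (stepRuns acc v) h1
    exact ⟨h3, by rw [List.foldl_cons] at *; rw [h4, h2, List.append_assoc]; rfl⟩

-- ===== VERDICT (by name: the statement is the Claim_ definition above) =====
theorem chunks_no_overlap_spec : Claim_equal_chunks_no_overlap := by
  intro lst n _
  unfold Spec_chunks_no_overlap chunks_no_overlap chunks_no_overlap_alt
  obtain ⟨hWF, hflat⟩ := runs_invariant lst [] ⟨by simp, List.isChain_nil⟩
  have hflat' : flattenRuns (List.foldl stepRuns [] lst) = lst := by
    simpa [flattenRuns] using hflat
  have h := run_equiv n _ hWF [[]] 0 none (by simp) (by intro p hp; simp)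
  rw [hflat'] at h
  exact h
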